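-- pv_equiv track=rewrite | github.com/Bob012340/yao-ai | yaoai.py | generate_story2
-- ===== SOURCE A (Python) =====
-- def generate_story2(raw, sentence_length):
--     story, sentence = [], []
--     for word in raw:
--         sentence.append(word)
--         if word in ['.', '!', '?', '.\"', '\n']:
--             if len(sentence) > 1 and sentence[0][0] != sentence[0][0].lower:
--                 story.append(sentence)
--             sentence = []
--     return story
-- ===== SOURCE B (Python) =====
-- # B: repeatedly split the list at the first terminator instead of A's single
-- # accumulator loop; a segment is kept iff it has more than one word, which makes
-- # A's always-true char-vs-bound-method comparison and its IndexError disappear.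
-- TERMS = ('.', '!', '?', '."', '\n')
--
-- def _split_first(ws):
--     """First terminator-ended prefix of ws and the remainder, or None."""
--     for i, w in enumerate(ws):
--         if w in TERMS:
--             return ws[:i + 1], ws[i + 1:]
--     return None
--
-- def generate_story2(raw, sentence_length):
--     story = []
--     rest = raw
--     while True:
--         hit = _split_first(rest)
--         if hit is None:
--             return story
--         seg, rest = hit
--         if len(seg) > 1:
--             story.append(seg)
-- ===== Notes on version B (the rewrite author's own statement) =====
-- stated objective: alternative
-- what changed: A keeps one accumulator loop that grows a pending sentence and flushes it at each terminator; B instead repeatedly splits the remainder at the first terminator into (segment, rest) and keeps a segment iff it has more than one word, which makes A's always-true char-vs-bound-method comparison and its IndexError disappear.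
-- outside the precondition, e.g. on generate_story2(['', '.'], 0): A raises IndexError, B returns [['', '.']]
-- crash fix: A raises IndexError when some terminator-ended segment of length > 1 starts with the empty word (sentence[0][0] on ''); B simply keeps that segment. — e.g. on generate_story2(["", "."], 0): A raises IndexError, B returns [["", "."]]
import Mathlib
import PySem

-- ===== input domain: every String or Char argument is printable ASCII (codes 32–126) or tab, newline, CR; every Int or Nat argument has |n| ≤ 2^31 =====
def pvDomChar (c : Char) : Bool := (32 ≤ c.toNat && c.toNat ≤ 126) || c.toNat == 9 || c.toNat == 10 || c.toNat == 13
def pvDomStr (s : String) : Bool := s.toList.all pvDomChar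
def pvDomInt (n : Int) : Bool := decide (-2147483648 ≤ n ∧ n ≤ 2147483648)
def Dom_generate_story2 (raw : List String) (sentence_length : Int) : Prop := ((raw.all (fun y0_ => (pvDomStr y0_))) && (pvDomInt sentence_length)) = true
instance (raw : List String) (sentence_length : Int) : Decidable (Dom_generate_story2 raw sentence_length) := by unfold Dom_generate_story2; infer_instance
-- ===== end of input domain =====

-- B replaces A's accumulator loop by repeated split-at-first-terminator; equal on Pre_,
-- and B returns a value where A raises IndexError (see Raises_ below).

def pvTerms : List String := [".", "!", "?", ".\"", "\n"]

-- ===== PORT A =====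
-- Python: `len(sentence) > 1 and sentence[0][0] != sentence[0][0].lower`.
-- `sentence[0][0]` is PySem.Str.pyGet?; none = IndexError (excluded by Pre_).
-- The comparison is a char vs the BOUND METHOD `.lower` (not a call), hence True
-- whenever the char exists: ported as `true` in the `some` branch.
-- `sentence[0]` is ported with headD ""; sentence is nonempty at every call site.
def pvPredA (s : List String) : Bool :=
  decide (1 < s.length) &&
    (match PySem.Str.pyGet? (s.headD "") 0 with
     | some _ => true      -- char ≠ bound method: always True in Python
     | none => false)      -- IndexError in Python; these inputs are outside Pre_

def pvLoopA (story : List (List String)) (sentence : List String) : List String → List (List String)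
  | [] => story
  | w :: ws =>
    let s' := sentence ++ [w]
    if pvTerms.contains w then
      pvLoopA (if pvPredA s' then story ++ [s'] else story) [] ws
    else
      pvLoopA story s' ws

def generate_story2 (raw : List String) (sentence_length : Int) : List (List String) :=
  pvLoopA [] [] raw

-- ===== PORT B =====
-- Source B's _split_first: first terminator-ended prefix and the remainder, or None.
def pvSplitFirst : List String → Option (List String × List String)
  | [] => none
  | w :: ws =>
    if pvTerms.contains w then some ([w], ws)
    else
      match pvSplitFirst ws with
      | none => none
      | some (seg, rest) => some (w :: seg, rest)

-- Source B's while-loop over (story, rest); ported with a length fuel (the remainder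
-- strictly shrinks at every split, pvSplitFirst_shorter, so the fuel never runs out).
def pvAltGo : Nat → List (List String) → List String → List (List String)
  | 0, story, _ => story
  | fuel + 1, story, ws =>
    match pvSplitFirst ws with
    | none => story
    | some (seg, rest) =>
      pvAltGo fuel (if 1 < seg.length then story ++ [seg] else story) rest

def generate_story2_alt (raw : List String) (sentence_length : Int) : List (List String) :=
  pvAltGo raw.length [] raw

-- ===== PRECONDITION & SPEC =====
-- A raises IndexError exactly when some terminator-ended segment of length > 1 starts
-- with the empty word ('' has no character 0); Pre_ excludes exactly those inputs.
def Raises_generate_story2 (raw : List String) (sentence_length : Int) : Prop :=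
  ∃ i < raw.length, raw.getD i "" ∈ pvTerms ∧
    ∃ s < i, raw.getD s "" = "" ∧ (s = 0 ∨ raw.getD (s - 1) "" ∈ pvTerms) ∧
      ∀ k < i, s < k → raw.getD k "" ∉ pvTerms

instance (raw : List String) (sentence_length : Int) : Decidable (Raises_generate_story2 raw sentence_length) := by
  unfold Raises_generate_story2; infer_instance

def Pre_generate_story2 (raw : List String) (sentence_length : Int) : Prop :=
  ¬ Raises_generate_story2 raw sentence_length

instance (raw : List String) (sentence_length : Int) : Decidable (Pre_generate_story2 raw sentence_length) := by
  unfold Pre_generate_story2; infer_instance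

def pvWitness_generate_story2 : List String × Int := (["Hi", "there", ".", "x", "!"], 0)

def pvRaiseWitness_generate_story2 : List String × Int := (["", "."], 0)
def pvRaiseWitnessOut_generate_story2 : List (List String) := [["", "."]]

def Spec_generate_story2 (raw : List String) (sentence_length : Int) (out : List (List String)) : Prop := out = generate_story2_alt raw sentence_length
instance (raw : List String) (sentence_length : Int) (out : List (List String)) : Decidable (Spec_generate_story2 raw sentence_length out) := by unfold Spec_generate_story2; infer_instance

-- ===== CLAIM (what is proved, stated in full; the proofs are below) =====
def Claim_equal_generate_story2 : Prop := ∀ (raw : List String) (sentence_length : Int), Dom_generate_story2 raw sentence_length → Pre_generate_story2 raw sentence_length → Spec_generate_story2 raw sentence_length (generate_story2 raw sentence_length)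

def Claim_raises_generate_story2 : Prop := (∀ (raw : List String) (sentence_length : Int), Dom_generate_story2 raw sentence_length → Raises_generate_story2 raw sentence_length → ¬ Pre_generate_story2 raw sentence_length) ∧ (Dom_generate_story2 (pvRaiseWitness_generate_story2.1) (pvRaiseWitness_generate_story2.2) ∧ Raises_generate_story2 (pvRaiseWitness_generate_story2.1) (pvRaiseWitness_generate_story2.2) ∧ generate_story2_alt (pvRaiseWitness_generate_story2.1) (pvRaiseWitness_generate_story2.2) = pvRaiseWitnessOut_generate_story2)

-- ===== LEMMAS AND PROOFS =====

-- the remainder of a split is strictly shorter (the fuel in pvAltGo never runs out)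
theorem pvSplitFirst_shorter : ∀ (ws seg rest : List String),
    pvSplitFirst ws = some (seg, rest) → rest.length < ws.length := by
  intro ws
  induction ws with
  | nil => intro seg rest h; simp [pvSplitFirst] at h
  | cons w ws ih =>
    intro seg rest h
    by_cases hw : w ∈ pvTerms
    · simp [pvSplitFirst, hw] at h
      obtain ⟨-, h2⟩ := h
      subst h2; simp
    · simp [pvSplitFirst, hw] at h
      cases hsf : pvSplitFirst ws with
      | none => rw [hsf] at h; simp at h
      | some p =>
        obtain ⟨seg0, rest0⟩ := p
        rw [hsf] at h
        simp at h
        obtain ⟨-, h2⟩ := h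
        have := ih seg0 rest0 hsf
        subst h2
        simp; omega


theorem pvLoopA_no_term : ∀ (ws : List String), pvSplitFirst ws = none →
    ∀ story sentence, pvLoopA story sentence ws = story := by
  intro ws
  induction ws with
  | nil => intro _ story sentence; simp [pvLoopA]
  | cons w ws ih =>
    intro h story sentence
    by_cases hw : w ∈ pvTerms
    · simp [pvSplitFirst, hw] at h
    · simp only [pvSplitFirst] at h
      rw [if_neg (by simpa using hw)] at h
      have hsf : pvSplitFirst ws = none := by
        cases hsf : pvSplitFirst ws with
        | none => rfl
        | some p => obtain ⟨a, b⟩ := p; rw [hsf] at h; simp at h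
      simp only [pvLoopA]
      rw [if_neg (by simpa using hw)]
      exact ih hsf story _

theorem pvLoopA_split : ∀ (ws seg rest : List String),
    pvSplitFirst ws = some (seg, rest) →
    ∀ story sentence,
      pvLoopA story sentence ws =
        pvLoopA (if pvPredA (sentence ++ seg) then story ++ [sentence ++ seg] else story) [] rest := by
  intro ws
  induction ws with
  | nil => intro seg rest h; simp [pvSplitFirst] at h
  | cons w ws ih =>
    intro seg rest h story sentence
    by_cases hw : w ∈ pvTerms
    · simp [pvSplitFirst, hw] at h
      obtain ⟨h1, h2⟩ := h
      subst h1; subst h2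
      simp only [pvLoopA]
      rw [if_pos (by simpa using hw)]
    · simp only [pvSplitFirst] at h
      rw [if_neg (by simpa using hw)] at h
      cases hsf : pvSplitFirst ws with
      | none => rw [hsf] at h; simp at h
      | some p =>
        obtain ⟨seg0, rest0⟩ := p
        rw [hsf] at h
        simp at h
        obtain ⟨h1, h2⟩ := h
        subst h1; subst h2
        simp only [pvLoopA]
        rw [if_neg (by simpa using hw)]
        rw [ih seg0 _ hsf story (sentence ++ [w])]
        simp

theorem pvSplitFirst_struct : ∀ (ws seg rest : List String),
    pvSplitFirst ws = some (seg, rest) →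
    ws = seg ++ rest ∧ ∃ pre t, seg = pre ++ [t] ∧ pvTerms.contains t = true ∧
      ∀ w ∈ pre, pvTerms.contains w = false := by
  intro ws
  induction ws with
  | nil => intro seg rest h; simp [pvSplitFirst] at h
  | cons w ws ih =>
    intro seg rest h
    by_cases hw : w ∈ pvTerms
    · simp [pvSplitFirst, hw] at h
      obtain ⟨h1, h2⟩ := h
      subst h1; subst h2
      exact ⟨by simp, [], w, by simp, by simpa using hw, by simp⟩
    · simp only [pvSplitFirst] at h
      rw [if_neg (by simpa using hw)] at h
      cases hsf : pvSplitFirst ws with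
      | none => rw [hsf] at h; simp at h
      | some p =>
        obtain ⟨seg0, rest0⟩ := p
        rw [hsf] at h
        simp at h
        obtain ⟨h1, h2⟩ := h
        subst h1; subst h2
        obtain ⟨hws, pre, t, hseg, ht, hpre⟩ := ih seg0 _ hsf
        refine ⟨by simp [hws], w :: pre, t, by simp [hseg], ht, ?_⟩
        intro x hx
        rcases List.mem_cons.1 hx with hx | hx
        · subst hx; simpa using hw
        · exact hpre x hx

theorem pvStr_pyGet?_zero_of_ne (w : String) (h : w ≠ "") :
    ∃ c, PySem.Str.pyGet? w 0 = some c := by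
  have hl : w.toList ≠ [] := by
    intro hnil
    exact h (String.toList_inj.mp (by simp [hnil]))
  have hpos : 0 < w.toList.length := List.length_pos_iff.2 hl
  have hcast : PySem.Str.pyGet? w 0 = w.toList[(0 : Nat)]? := by
    simpa using PySem.List.pyGet?_natCast (xs := w.toList) (n := 0)
  rw [hcast]
  exact ⟨_, List.getElem?_eq_some_iff.2 ⟨hpos, rfl⟩⟩

theorem pvPredA_of_head_ne (w : String) (t : List String) (h : w ≠ "") :
    pvPredA (w :: t) = decide (1 < (w :: t).length) := by
  obtain ⟨c, hc⟩ := pvStr_pyGet?_zero_of_ne w h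
  simp at hc
  simp [pvPredA, hc]

-- lifting a raise witness through one split
theorem pvRaises_lift (ws seg rest : List String)
    (h : pvSplitFirst ws = some (seg, rest)) (n : Int)
    (hr : Raises_generate_story2 rest n) : Raises_generate_story2 ws n := by
  obtain ⟨hws, pre, t, hseg, ht, hpre⟩ := pvSplitFirst_struct ws seg rest h
  obtain ⟨i, hi, hti, s, hsi, hs0, hsprev, hint⟩ := hr
  have hL : seg.length = pre.length + 1 := by simp [hseg]
  have hLpos : 0 < seg.length := by omega
  have hget : ∀ j, ws.getD (seg.length + j) "" = rest.getD j "" := by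
    intro j
    rw [hws, List.getD_append_right seg rest "" _ (by omega)]
    congr 1; omega
  refine ⟨seg.length + i, ?_, ?_, seg.length + s, by omega, ?_, ?_, ?_⟩
  · rw [hws]; simp; omega
  · rw [hget]; exact hti
  · rw [hget]; exact hs0
  · right
    by_cases hs : s = 0
    · subst hs
      have : seg.length + 0 - 1 = pre.length := by omega
      rw [this, hws, List.getD_append seg rest "" _ (by omega)]
      rw [hseg, List.getD_append_right pre [t] "" _ (by omega)]
      simp [List.getD]
      simpa [pvTerms] using ht
    · rcases hsprev with hz | hp
      · exact absurd hz hs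
      · have : seg.length + s - 1 = seg.length + (s - 1) := by omega
        rw [this, hget]
        exact hp
  · intro k hk hsk
    have hkL : seg.length ≤ k := by omega
    have : k = seg.length + (k - seg.length) := by omega
    rw [this, hget]
    exact hint _ (by omega) (by omega)

theorem pvRaises_bad (ws seg rest : List String)
    (h : pvSplitFirst ws = some (seg, rest)) (n : Int)
    (hlen : 1 < seg.length) (hd : seg.headD "" = "") : Raises_generate_story2 ws n := by
  obtain ⟨hws, pre, t, hseg, ht, hpre⟩ := pvSplitFirst_struct ws seg rest h
  cases pre with
  | nil => simp [hseg] at hlen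
  | cons p0 ptl =>
    have hp0 : p0 = "" := by simpa [hseg] using hd
    have hL : seg.length = ptl.length + 2 := by simp [hseg]
    refine ⟨ptl.length + 1, ?_, ?_, 0, by omega, ?_, Or.inl rfl, ?_⟩
    · rw [hws]; simp; omega
    · rw [hws, List.getD_append seg rest "" _ (by omega)]
      rw [hseg, List.getD_append_right (p0 :: ptl) [t] "" _ (by simp)]
      simp [List.getD]
      simpa [pvTerms] using ht
    · rw [hws, List.getD_append seg rest "" _ (by omega), hseg,
        List.getD_append (p0 :: ptl) [t] "" _ (by simp)]
      simpa [List.getD] using hp0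
    · intro k hk hpos
      have hkpre : k < (p0 :: ptl).length := by simp; omega
      rw [hws, List.getD_append seg rest "" _ (by omega), hseg,
        List.getD_append (p0 :: ptl) [t] "" _ hkpre]
      rw [List.getD_eq_getElem _ _ hkpre]
      have hc := hpre _ (List.getElem_mem hkpre)
      simp at hc
      exact hc

theorem pvMain (n : Int) : ∀ (fuel : Nat) (ws : List String) (story : List (List String)),
    ws.length ≤ fuel → ¬ Raises_generate_story2 ws n →
    pvLoopA story [] ws = pvAltGo fuel story ws := by
  intro fuel
  induction fuel with
  | zero =>
    intro ws story hle _
    have : ws = [] := List.length_eq_zero_iff.1 (Nat.le_zero.1 hle)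
    subst this
    simp [pvLoopA, pvAltGo]
  | succ fuel ih =>
    intro ws story hle hnr
    cases hsf : pvSplitFirst ws with
    | none =>
      rw [pvLoopA_no_term ws hsf]
      simp [pvAltGo, hsf]
    | some p =>
      obtain ⟨seg, rest⟩ := p
      have hrest : rest.length < ws.length := pvSplitFirst_shorter ws seg rest hsf
      have hnr' : ¬ Raises_generate_story2 rest n :=
        fun hr => hnr (pvRaises_lift ws seg rest hsf n hr)
      rw [pvLoopA_split ws seg rest hsf story []]
      simp only [List.nil_append]
      by_cases hlen : 1 < seg.length
      · have hhd : seg.headD "" ≠ "" :=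
          fun hd => hnr (pvRaises_bad ws seg rest hsf n hlen hd)
        cases hseg' : seg with
        | nil => simp [hseg'] at hlen
        | cons a l =>
          have ha : a ≠ "" := by simpa [hseg'] using hhd
          have hlen' : 1 < (a :: l).length := hseg' ▸ hlen
          rw [pvPredA_of_head_ne a l ha]
          rw [if_pos (by simpa using hlen')]
          rw [ih rest (story ++ [a :: l]) (by omega) hnr']
          have hl : l ≠ [] := by
            intro h0; rw [h0] at hlen'; simp at hlen'
          simp [pvAltGo, hsf, hseg', List.length_pos_iff, hl]
      · have hpf : pvPredA seg = false := by
          simp [pvPredA, hlen]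
        rw [hpf]
        simp only [Bool.false_eq_true, if_false]
        rw [ih rest story (by omega) hnr']
        simp [pvAltGo, hsf, hlen]

-- ===== VERDICT (by name: the statement is the Claim_ definition above) =====
theorem generate_story2_spec : Claim_equal_generate_story2 := by
  intro raw n _ hpre
  unfold Spec_generate_story2 generate_story2 generate_story2_alt
  simpa using pvMain n raw.length raw [] le_rfl hpre

theorem generate_story2_raises : Claim_raises_generate_story2 := by
  unfold Claim_raises_generate_story2
  exact ⟨fun raw n _ hr hp => hp hr, by decide⟩

-- self-check (uses generate_story2_raises): the raise witness really lies outside Pre_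
theorem pvRaiseWitness_ok :
    ¬ Pre_generate_story2 pvRaiseWitness_generate_story2.1 pvRaiseWitness_generate_story2.2 :=
  generate_story2_raises.1 pvRaiseWitness_generate_story2.1 pvRaiseWitness_generate_story2.2
    (by decide) (by decide)
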